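-- pv_equiv track=rewrite | github.com/dokyung36d/programmersCodingTest | 인구 이동.py | bfs
-- ===== SOURCE A (Python) =====
-- def bfs(matrix, currentPos, visitedMatrix, N, L, R):
--     # maxVisited = []
--     directions = [(-1, 0), (1, 0), (0, -1), (0, 1)]
--     peopleMoveFlag = 0
--
--     queue = [currentPos]
--     movedPosList = [currentPos]
--     while queue:
--         currentPos = queue.pop()
--
--         for direction in directions:
--             movedPos = addTwoTuple(currentPos, direction)
--             if not checkIndex(movedPos, N):
--                 continue
--
--             if not checkWhetherMoveAvailable(matrix, currentPos, movedPos, L, R):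
--                 continue
--
--             if movedPos in movedPosList:
--                 continue
--
--             if visitedMatrix[movedPos[0]][movedPos[1]] == 1:
--                 continue
--
--             visitedMatrix[movedPos[0]][movedPos[1]] = 1
--             peopleMoveFlag = 1
--             queue.append(movedPos)
--             movedPosList.append(movedPos)
--
--             # if len(updatedVisited) > len(maxVisited):
--             #     maxVisited = updatedVisited
--     # for movedPos in movedPosList:
--     #     visitedMatrix[movedPos[0]][movedPos[1]] = 1
--
--
--     if peopleMoveFlag == 0:
--         return matrix, visitedMatrix, peopleMoveFlag
--
--
--     totalPeople = 0
--     for visitedIndex in movedPosList: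
--         totalPeople += matrix[visitedIndex[0]][visitedIndex[1]]
--
--     meanPeople = totalPeople // len(movedPosList)
--     for visitedIndex in movedPosList:
--         matrix[visitedIndex[0]][visitedIndex[1]] = meanPeople
--     return matrix, visitedMatrix, peopleMoveFlag
--
-- def checkWhetherMoveAvailable(matrix, index1, index2, L, R):
--     value1, value2 = matrix[index1[0]][index1[1]], matrix[index2[0]][index2[1]]
--
--     if L <= abs(value1 - value2) <= R:
--         return True
--
--     return False
--
-- def addTwoTuple(tuple1, tuple2):
--     return (tuple1[0] + tuple2[0], tuple1[1] + tuple2[1])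
--
-- def checkIndex(index, N):
--     if 0 <= index[0] < N and 0 <= index[1] < N:
--         return True
--
--     return False
-- ===== SOURCE B (Python) =====
-- def bfs(matrix, currentPos, visitedMatrix, N, L, R):
--     # Level-by-level frontier BFS; the linear "in movedPosList" scan is replaced by
--     # a direct "== start" test (every non-start collected cell is marked in visitedMatrix).
--     start = currentPos
--     component = [start]
--     frontier = [start]
--     while frontier:
--         nextFrontier = []
--         for px, py in frontier:
--             for qx, qy in ((px - 1, py), (px + 1, py), (px, py - 1), (px, py + 1)):
--                 if not (0 <= qx < N and 0 <= qy < N):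
--                     continue
--                 if not (L <= abs(matrix[px][py] - matrix[qx][qy]) <= R):
--                     continue
--                 if (qx, qy) == start or visitedMatrix[qx][qy] == 1:
--                     continue
--                 visitedMatrix[qx][qy] = 1
--                 component.append((qx, qy))
--                 nextFrontier.append((qx, qy))
--         frontier = nextFrontier
--     if len(component) == 1:
--         return matrix, visitedMatrix, 0
--     meanPeople = sum(matrix[x][y] for x, y in component) // len(component)
--     for x, y in component:
--         matrix[x][y] = meanPeople
--     return matrix, visitedMatrix, 1
-- ===== Notes on version B (the rewrite author's own statement) =====
-- stated objective: alternative
-- what changed: A's pop-from-stack DFS with a linear 'movedPos in movedPosList' scan per neighbour is replaced by level-by-level frontier BFS whose duplicate test is a direct '== start' comparison (every other collected cell is already marked in visitedMatrix), and the flag/total are computed from the finished component (len>1, sum()//len) instead of being threaded through the loop.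
-- outside the precondition, e.g. on bfs([[5]], (0, 0), [[0]], 2, 1, 10): A raises IndexError, B raises IndexError
import Mathlib
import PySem

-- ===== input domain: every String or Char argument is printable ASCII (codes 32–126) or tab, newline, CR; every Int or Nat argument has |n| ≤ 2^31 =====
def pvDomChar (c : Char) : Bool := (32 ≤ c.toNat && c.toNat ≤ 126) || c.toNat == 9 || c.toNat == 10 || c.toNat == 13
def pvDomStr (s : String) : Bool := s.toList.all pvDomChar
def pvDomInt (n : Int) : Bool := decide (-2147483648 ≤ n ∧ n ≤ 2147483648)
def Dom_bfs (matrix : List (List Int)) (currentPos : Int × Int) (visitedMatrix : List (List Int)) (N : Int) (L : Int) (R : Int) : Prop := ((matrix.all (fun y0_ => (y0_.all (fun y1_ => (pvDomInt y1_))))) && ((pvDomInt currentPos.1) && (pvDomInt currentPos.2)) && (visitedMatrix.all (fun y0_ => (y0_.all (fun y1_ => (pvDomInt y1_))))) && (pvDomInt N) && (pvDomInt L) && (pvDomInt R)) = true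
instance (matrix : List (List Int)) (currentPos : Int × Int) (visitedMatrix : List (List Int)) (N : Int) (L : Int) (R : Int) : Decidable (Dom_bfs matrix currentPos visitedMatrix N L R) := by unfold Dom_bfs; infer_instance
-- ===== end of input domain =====

-- B replaces A's stack-DFS with level-by-level frontier BFS and replaces the linear
-- "movedPos in movedPosList" scan by a direct "== start" test (every other collected
-- cell is already marked in visitedMatrix).  Both A and B mutate matrix and
-- visitedMatrix in place in the same way; the equivalence proved here is about the
-- returned triple (which contains those same objects).

-- ===== PORT A =====
-- matrix[i][j] read, totalised with default 0 (Pre_ keeps every access in range)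
def pvGetCell (m : List (List Int)) (i j : Int) : Int :=
  PySem.List.pyGetD (PySem.List.pyGetD m i []) j 0

-- matrix[i][j] = v  (indices are nonnegative and in range on every admitted input)
def pvSetCell (m : List (List Int)) (i j : Int) (v : Int) : List (List Int) :=
  m.modify i.toNat (fun row => row.set j.toNat v)

def pvAddTwoTuple (t1 t2 : Int × Int) : Int × Int := (t1.1 + t2.1, t1.2 + t2.2)

def pvCheckIndex (index : Int × Int) (N : Int) : Bool :=
  decide (0 ≤ index.1 ∧ index.1 < N ∧ 0 ≤ index.2 ∧ index.2 < N)

def pvCheckMove (matrix : List (List Int)) (i1 i2 : Int × Int) (L R : Int) : Bool :=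
  decide (L ≤ |pvGetCell matrix i1.1 i1.2 - pvGetCell matrix i2.1 i2.2| ∧
          |pvGetCell matrix i1.1 i1.2 - pvGetCell matrix i2.1 i2.2| ≤ R)

def pvDirs : List (Int × Int) := [(-1, 0), (1, 0), (0, -1), (0, 1)]

-- one direction of A's inner for-loop; state = (queue, movedPosList, visitedMatrix, flag)
def pvStepA (matrix : List (List Int)) (N L R : Int) (cur : Int × Int)
    (st : List (Int × Int) × List (Int × Int) × List (List Int) × Int) (d : Int × Int) :
    List (Int × Int) × List (Int × Int) × List (List Int) × Int :=
  let q := pvAddTwoTuple cur d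
  if ¬ pvCheckIndex q N then st
  else if ¬ pvCheckMove matrix cur q L R then st
  else if q ∈ st.2.1 then st
  else if pvGetCell st.2.2.1 q.1 q.2 == 1 then st
  else (st.1 ++ [q], st.2.1 ++ [q], pvSetCell st.2.2.1 q.1 q.2 1, 1)

-- A's while-loop (queue.pop() pops the LAST element); fuel only makes it total
def pvLoopA (matrix : List (List Int)) (N L R : Int) :
    Nat → List (Int × Int) × List (Int × Int) × List (List Int) × Int →
    List (Int × Int) × List (Int × Int) × List (List Int) × Int
  | 0, st => st
  | fuel + 1, st =>
    match st.1.getLast? with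
    | none => st
    | some cur =>
      pvLoopA matrix N L R fuel
        (pvDirs.foldl (pvStepA matrix N L R cur) (st.1.dropLast, st.2.1, st.2.2.1, st.2.2.2))

def bfs (matrix : List (List Int)) (currentPos : Int × Int) (visitedMatrix : List (List Int)) (N : Int) (L : Int) (R : Int) : List (List Int) × List (List Int) × Int :=
  let st := pvLoopA matrix N L R (2 * (N.toNat * N.toNat + 1) + 1)
    ([currentPos], [currentPos], visitedMatrix, 0)
  let moved := st.2.1
  let vis := st.2.2.1
  let flag := st.2.2.2
  if flag == 0 then (matrix, vis, flag)
  else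
    let total := moved.foldl (fun s p => s + pvGetCell matrix p.1 p.2) 0
    let mean := PySem.Int.floordiv total (moved.length : Int)
    (moved.foldl (fun m p => pvSetCell m p.1 p.2 mean) matrix, vis, flag)

-- ===== PORT B =====
-- the four neighbours of p, in Source B's order
def pvNbrs (p : Int × Int) : List (Int × Int) :=
  [(p.1 - 1, p.2), (p.1 + 1, p.2), (p.1, p.2 - 1), (p.1, p.2 + 1)]

-- one candidate neighbour q of p; state = (nextFrontier, component, visitedMatrix)
def pvVisitB (matrix : List (List Int)) (start : Int × Int) (N L R : Int) (p : Int × Int)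
    (st : List (Int × Int) × List (Int × Int) × List (List Int)) (q : Int × Int) :
    List (Int × Int) × List (Int × Int) × List (List Int) :=
  if ¬ decide (0 ≤ q.1 ∧ q.1 < N ∧ 0 ≤ q.2 ∧ q.2 < N) then st
  else if ¬ decide (L ≤ |pvGetCell matrix p.1 p.2 - pvGetCell matrix q.1 q.2| ∧
                    |pvGetCell matrix p.1 p.2 - pvGetCell matrix q.1 q.2| ≤ R) then st
  else if q == start || pvGetCell st.2.2 q.1 q.2 == 1 then st
  else (st.1 ++ [q], st.2.1 ++ [q], pvSetCell st.2.2 q.1 q.2 1)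

-- Source B's while-loop over frontiers; fuel only makes it total
def pvLoopB (matrix : List (List Int)) (start : Int × Int) (N L R : Int) :
    Nat → List (Int × Int) → List (Int × Int) × List (List Int) →
    List (Int × Int) × List (List Int)
  | 0, _, st => st
  | fuel + 1, frontier, st =>
    if frontier.isEmpty then st
    else
      let st' := frontier.foldl
        (fun s p => (pvNbrs p).foldl (pvVisitB matrix start N L R p) s) ([], st.1, st.2)
      pvLoopB matrix start N L R fuel st'.1 (st'.2.1, st'.2.2)

def bfs_alt (matrix : List (List Int)) (currentPos : Int × Int) (visitedMatrix : List (List Int)) (N : Int) (L : Int) (R : Int) : List (List Int) × List (List Int) × Int :=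
  let res := pvLoopB matrix currentPos N L R (N.toNat * N.toNat + 3)
    [currentPos] ([currentPos], visitedMatrix)
  let comp := res.1
  let vis := res.2
  if comp.length == 1 then (matrix, vis, 0)
  else
    let mean := PySem.Int.floordiv (comp.map (fun p => pvGetCell matrix p.1 p.2)).sum
      (comp.length : Int)
    (comp.foldl (fun m p => pvSetCell m p.1 p.2 mean) matrix, vis, 1)

-- ===== PRECONDITION & SPEC =====
-- Pre_ restricts to the problem's natural domain — start inside the N×N grid with matrix
-- and visitedMatrix large enough to hold it — or the degenerate inputs on which every
-- neighbour of the start is outside the grid (there A touches nothing and returns its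
-- arguments unchanged).  Outside Pre_, A generally raises IndexError, or returns a value
-- that depends on Python's negative-index wraparound.
def Pre_bfs (matrix : List (List Int)) (currentPos : Int × Int) (visitedMatrix : List (List Int)) (N : Int) (L : Int) (R : Int) : Prop :=
  ((0 ≤ currentPos.1 ∧ currentPos.1 < N ∧ 0 ≤ currentPos.2 ∧ currentPos.2 < N) ∧
    N.toNat ≤ matrix.length ∧ (∀ row ∈ matrix, N.toNat ≤ row.length) ∧
    N.toNat ≤ visitedMatrix.length ∧ (∀ row ∈ visitedMatrix, N.toNat ≤ row.length)) ∨
  (¬ (0 ≤ currentPos.1 - 1 ∧ currentPos.1 - 1 < N ∧ 0 ≤ currentPos.2 ∧ currentPos.2 < N) ∧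
   ¬ (0 ≤ currentPos.1 + 1 ∧ currentPos.1 + 1 < N ∧ 0 ≤ currentPos.2 ∧ currentPos.2 < N) ∧
   ¬ (0 ≤ currentPos.1 ∧ currentPos.1 < N ∧ 0 ≤ currentPos.2 - 1 ∧ currentPos.2 - 1 < N) ∧
   ¬ (0 ≤ currentPos.1 ∧ currentPos.1 < N ∧ 0 ≤ currentPos.2 + 1 ∧ currentPos.2 + 1 < N))

instance (matrix : List (List Int)) (currentPos : Int × Int) (visitedMatrix : List (List Int)) (N : Int) (L : Int) (R : Int) : Decidable (Pre_bfs matrix currentPos visitedMatrix N L R) := by unfold Pre_bfs; infer_instance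

def pvWitness_bfs : List (List Int) × (Int × Int) × List (List Int) × Int × Int × Int :=
  ([[1, 2], [3, 4]], (0, 0), [[0, 0], [0, 0]], 2, 1, 100)

def Spec_bfs (matrix : List (List Int)) (currentPos : Int × Int) (visitedMatrix : List (List Int)) (N : Int) (L : Int) (R : Int) (out : List (List Int) × List (List Int) × Int) : Prop := out = bfs_alt matrix currentPos visitedMatrix N L R
instance (matrix : List (List Int)) (currentPos : Int × Int) (visitedMatrix : List (List Int)) (N : Int) (L : Int) (R : Int) (out : List (List Int) × List (List Int) × Int) : Decidable (Spec_bfs matrix currentPos visitedMatrix N L R out) := by unfold Spec_bfs; infer_instance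

-- ===== CLAIM (what is proved, stated in full; the proofs are below) =====
def Claim_equal_bfs : Prop := ∀ (matrix : List (List Int)) (currentPos : Int × Int) (visitedMatrix : List (List Int)) (N : Int) (L : Int) (R : Int), Dom_bfs matrix currentPos visitedMatrix N L R → Pre_bfs matrix currentPos visitedMatrix N L R → Spec_bfs matrix currentPos visitedMatrix N L R (bfs matrix currentPos visitedMatrix N L R)

-- ===== LEMMAS AND PROOFS =====

-- a grid cell (what checkIndex accepts)
def pvCell (N : Int) (q : Int × Int) : Prop :=
  0 ≤ q.1 ∧ q.1 < N ∧ 0 ≤ q.2 ∧ q.2 < N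

-- enough rows/columns to hold the N×N grid
def pvShape (N : Int) (m : List (List Int)) : Prop :=
  N.toNat ≤ m.length ∧ ∀ (i : Nat) (h : i < m.length), N.toNat ≤ m[i].length

-- mark every cell of l with 1 (what A's/B's visited mutation amounts to)
def pvMark (vis0 : List (List Int)) (l : List (Int × Int)) : List (List Int) :=
  l.foldl (fun v p => pvSetCell v p.1 p.2 1) vis0

theorem pvMark_nil (vis0 : List (List Int)) : pvMark vis0 [] = vis0 := rfl

theorem pvShape_of_mem {N : Int} {m : List (List Int)}
    (h1 : N.toNat ≤ m.length) (h2 : ∀ row ∈ m, N.toNat ≤ row.length) : pvShape N m :=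
  ⟨h1, fun i hi => h2 _ (List.getElem_mem hi)⟩

theorem pvShape_setCell {N : Int} {m : List (List Int)} (h : pvShape N m) (i j v : Int) :
    pvShape N (pvSetCell m i j v) := by
  obtain ⟨h1, h2⟩ := h
  refine ⟨by simpa [pvSetCell] using h1, ?_⟩
  intro k hk
  simp only [pvSetCell, List.getElem_modify]
  split
  · simpa using h2 k (by simpa [pvSetCell] using hk)
  · exact h2 k (by simpa [pvSetCell] using hk)

theorem pvGetCell_eq {N : Int} {m : List (List Int)} {q : Int × Int}
    (hm : pvShape N m) (hq : pvCell N q) :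
    ∃ (h1 : q.1.toNat < m.length) (h2 : q.2.toNat < (m[q.1.toNat]).length),
      pvGetCell m q.1 q.2 = m[q.1.toNat][q.2.toNat] := by
  obtain ⟨ha, hb, hc, hd⟩ := hq
  have h1 : q.1.toNat < m.length := lt_of_lt_of_le (by omega) hm.1
  have h2 : q.2.toNat < (m[q.1.toNat]).length := lt_of_lt_of_le (by omega) (hm.2 _ h1)
  refine ⟨h1, h2, ?_⟩
  rw [pvGetCell, PySem.List.pyGetD_eq_getElem _ _ ha (by omega),
    PySem.List.pyGetD_eq_getElem _ _ hc (by omega)]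

theorem pvGetCell_setCell_self {N : Int} {m : List (List Int)} {q : Int × Int}
    (hm : pvShape N m) (hq : pvCell N q) (v : Int) :
    pvGetCell (pvSetCell m q.1 q.2 v) q.1 q.2 = v := by
  obtain ⟨h1, h2, he⟩ := pvGetCell_eq (pvShape_setCell hm q.1 q.2 v) hq
  have h1' : q.1.toNat < m.length := by simpa [pvSetCell] using h1
  rw [he]
  simp [pvSetCell]

theorem pvGetCell_setCell_ne {N : Int} {m : List (List Int)} {p q : Int × Int}
    (hm : pvShape N m) (hp : pvCell N p) (hq : pvCell N q) (hne : p ≠ q) (v : Int) :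
    pvGetCell (pvSetCell m p.1 p.2 v) q.1 q.2 = pvGetCell m q.1 q.2 := by
  obtain ⟨h1, h2, he⟩ := pvGetCell_eq (pvShape_setCell hm p.1 p.2 v) hq
  obtain ⟨g1, g2, ge⟩ := pvGetCell_eq hm hq
  rw [he, ge]
  have hnat : p.1.toNat ≠ q.1.toNat ∨ p.2.toNat ≠ q.2.toNat := by
    by_contra hcon
    push Not at hcon
    apply hne
    obtain ⟨ha, _, hc, _⟩ := hp; obtain ⟨ha', _, hc', _⟩ := hq
    exact Prod.ext (by omega) (by omega)
  rcases hnat with hne1 | hne2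
  · simp [pvSetCell, List.getElem_modify, if_neg hne1]
  · by_cases hne1 : p.1.toNat = q.1.toNat
    · simp [pvSetCell, hne1, List.getElem_set_ne hne2]
    · simp [pvSetCell, List.getElem_modify, if_neg hne1]

theorem pvRowComm (l : List Int) (i j : Nat) (v : Int) :
    (l.set i v).set j v = (l.set j v).set i v := by
  by_cases h : i = j
  · rw [h]
  · exact List.set_comm _ _ h

theorem pvSetCell_comm (m : List (List Int)) (a b : Int × Int) (v : Int) :
    pvSetCell (pvSetCell m a.1 a.2 v) b.1 b.2 v = pvSetCell (pvSetCell m b.1 b.2 v) a.1 a.2 v := by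
  apply List.ext_getElem (by simp [pvSetCell])
  intro k hk1 hk2
  simp only [pvSetCell, List.getElem_modify]
  by_cases ha : a.1.toNat = k <;> by_cases hb : b.1.toNat = k <;>
    simp [ha, hb, pvRowComm]

theorem pvGetCell_mark {N : Int} {vis0 : List (List Int)} {l : List (Int × Int)} {q : Int × Int}
    (hm : pvShape N vis0) (hl : ∀ p ∈ l, pvCell N p) (hq : pvCell N q) :
    pvGetCell (pvMark vis0 l) q.1 q.2 = if q ∈ l then 1 else pvGetCell vis0 q.1 q.2 := by
  induction l generalizing vis0 with
  | nil => simp [pvMark_nil]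
  | cons p t ih =>
    have hp := hl p (List.mem_cons_self ..)
    have step : pvMark vis0 (p :: t) = pvMark (pvSetCell vis0 p.1 p.2 1) t := rfl
    rw [step, ih (pvShape_setCell hm p.1 p.2 1) (fun x hx => hl x (List.mem_cons_of_mem _ hx))]
    by_cases hqt : q ∈ t
    · simp [hqt]
    · by_cases hqp : q = p
      · subst hqp
        simp [hqt, pvGetCell_setCell_self hm hq]
      · simp [hqt, hqp, pvGetCell_setCell_ne hm hp hq (fun h => hqp h.symm)]

-- the migration graph on the INPUT data: q is a grid neighbour of p, the population
-- difference is within [L, R], and q is not marked in the INPUT visitedMatrix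
def pvEdge (matrix vis0 : List (List Int)) (N L R : Int) (p q : Int × Int) : Prop :=
  q ∈ pvNbrs p ∧ pvCell N q ∧
  (L ≤ |pvGetCell matrix p.1 p.2 - pvGetCell matrix q.1 q.2| ∧
   |pvGetCell matrix p.1 p.2 - pvGetCell matrix q.1 q.2| ≤ R) ∧
  pvGetCell vis0 q.1 q.2 ≠ 1

-- reachability from the start cell along pvEdge (the component both programs collect)
inductive pvReach (matrix vis0 : List (List Int)) (N L R : Int) (s : Int × Int) : Int × Int → Prop
  | base : pvReach matrix vis0 N L R s s
  | step {p q : Int × Int} : pvReach matrix vis0 N L R s p →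
      pvEdge matrix vis0 N L R p q → pvReach matrix vis0 N L R s q

theorem pvNbrs_eq_map (p : Int × Int) :
    pvNbrs p = pvDirs.map (fun d => pvAddTwoTuple p d) := by
  simp [pvNbrs, pvDirs, pvAddTwoTuple, sub_eq_add_neg]

theorem pvReach_mem {matrix vis0 : List (List Int)} {N L R : Int} {s : Int × Int}
    {M : List (Int × Int)} (hs : s ∈ M)
    (hcl : ∀ p ∈ M, ∀ q, pvEdge matrix vis0 N L R p q → q ∈ M) :
    ∀ q, pvReach matrix vis0 N L R s q → q ∈ M := by
  intro q hq
  induction hq with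
  | base => exact hs
  | step hp he ih => exact hcl _ ih _ he

-- characterisation of one inner step of A on an invariant-shaped state: the candidate
-- cell is appended iff it is a fresh pvEdge-successor, and the mutated visitedMatrix
-- stays of the form pvMark vis0 (collected tail).
theorem pvStepA_add {matrix vis0 : List (List Int)} {N L R : Int} {s cur q : Int × Int}
    (d : Int × Int) (hsh : pvShape N vis0) {t : List (Int × Int)}
    (ht : ∀ p ∈ t, pvCell N p)
    (queue : List (Int × Int)) (flag : Int)
    (hqd : q = pvAddTwoTuple cur d)
    (hE : pvEdge matrix vis0 N L R cur q) (hnm : q ∉ s :: t) :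
    pvStepA matrix N L R cur (queue, s :: t, pvMark vis0 t, flag) d =
      (queue ++ [q], (s :: t) ++ [q], pvMark vis0 (t ++ [q]), 1) := by
  obtain ⟨hnb, hc, hv, h1⟩ := hE
  have hqt : q ∉ t := fun h => hnm (List.mem_cons_of_mem _ h)
  have hmk : pvGetCell (pvMark vis0 t) q.1 q.2 = pvGetCell vis0 q.1 q.2 := by
    rw [pvGetCell_mark hsh ht hc, if_neg hqt]
  simp only [pvStepA, ← hqd]
  rw [if_neg, if_neg, if_neg, if_neg]
  · simp [pvMark]
  · simp only [hmk]
    simpa using h1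
  · simpa using hnm
  · simp only [pvCheckMove]
    simpa using hv
  · simp only [pvCheckIndex]
    simpa [pvCell] using hc

theorem pvStepA_skip {matrix vis0 : List (List Int)} {N L R : Int} {s cur : Int × Int}
    {d : Int × Int} (hd : d ∈ pvDirs) (hsh : pvShape N vis0) {t : List (Int × Int)}
    (ht : ∀ p ∈ t, pvCell N p)
    (queue : List (Int × Int)) (flag : Int)
    (hE : ¬ (pvEdge matrix vis0 N L R cur (pvAddTwoTuple cur d) ∧ pvAddTwoTuple cur d ∉ s :: t)) :
    pvStepA matrix N L R cur (queue, s :: t, pvMark vis0 t, flag) d =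
      (queue, s :: t, pvMark vis0 t, flag) := by
  set q := pvAddTwoTuple cur d with hq
  simp only [pvStepA, ← hq]
  split
  · rfl
  · split
    · rfl
    · split
      · rfl
      · split
        · rfl
        · exfalso
          rename_i h1 h2 h3 h4
          have hc : pvCell N q := by
            simpa [pvCheckIndex, pvCell] using h1
          have hmem : q ∉ s :: t := by simpa using h3
          have hqt : q ∉ t := fun h => hmem (List.mem_cons_of_mem _ h)
          apply hE
          refine ⟨⟨?_, hc, ?_, ?_⟩, hmem⟩
          · rw [pvNbrs_eq_map]
            exact List.mem_map_of_mem hd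
          · simpa [pvCheckMove] using h2
          · have := pvGetCell_mark (q := q) hsh ht hc
            rw [if_neg hqt] at this
            rw [← this]
            simpa using h4

theorem pvFoldA_spec {matrix vis0 : List (List Int)} {N L R : Int} {s cur : Int × Int}
    (hsh : pvShape N vis0) (hcur : pvReach matrix vis0 N L R s cur) :
    ∀ (ds : List (Int × Int)), (∀ d ∈ ds, d ∈ pvDirs) →
    ∀ (queue t : List (Int × Int)) (flag : Int),
      (∀ p ∈ t, pvCell N p) → (s :: t).Nodup →
      ∃ fr,
        ds.foldl (pvStepA matrix N L R cur) (queue, s :: t, pvMark vis0 t, flag)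
          = (queue ++ fr, s :: (t ++ fr), pvMark vis0 (t ++ fr),
             if fr = [] then flag else 1) ∧
        (∀ x ∈ fr, pvCell N x ∧ pvReach matrix vis0 N L R s x) ∧
        (s :: (t ++ fr)).Nodup ∧
        (∀ d ∈ ds, pvEdge matrix vis0 N L R cur (pvAddTwoTuple cur d) →
          pvAddTwoTuple cur d ∈ s :: (t ++ fr)) := by
  intro ds
  induction ds with
  | nil =>
    intro _ queue t flag ht hnd
    exact ⟨[], by simp, by simp, by simpa using hnd, by simp⟩
  | cons d ds ih =>
    intro hsub queue t flag ht hnd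
    have hd := hsub d (List.mem_cons_self ..)
    have hsub' : ∀ x ∈ ds, x ∈ pvDirs := fun x hx => hsub x (List.mem_cons_of_mem _ hx)
    by_cases hE : pvEdge matrix vis0 N L R cur (pvAddTwoTuple cur d) ∧
        pvAddTwoTuple cur d ∉ s :: t
    · set q := pvAddTwoTuple cur d with hqdef
      have ht' : ∀ p ∈ t ++ [q], pvCell N p := by
        intro p hp
        rcases List.mem_append.mp hp with h | h
        · exact ht p h
        · rw [List.mem_singleton.mp h]; exact hE.1.2.1
      have hnd' : (s :: (t ++ [q])).Nodup := by
        rcases List.nodup_cons.mp hnd with ⟨hs, hts⟩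
        have h2 := hE.2
        simp only [List.mem_cons, not_or] at h2
        refine List.nodup_cons.mpr ⟨?_, ?_⟩
        · intro hmem
          rcases List.mem_append.mp hmem with h | h
          · exact hs h
          · exact h2.1 (List.mem_singleton.mp h).symm
        · rw [List.nodup_append]
          refine ⟨hts, List.nodup_singleton q, ?_⟩
          intro a ha b hb heq
          rw [heq, List.mem_singleton.mp hb] at ha
          exact h2.2 ha
      obtain ⟨fr, heq, hfr, hnd'', hcl⟩ := ih hsub' (queue ++ [q]) (t ++ [q]) 1 ht' hnd'
      refine ⟨q :: fr, ?_, ?_, ?_, ?_⟩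
      · rw [List.foldl_cons, pvStepA_add d hsh ht queue flag hqdef hE.1 hE.2]
        rw [show (s :: t) ++ [q] = s :: (t ++ [q]) from rfl]
        rw [heq]
        simp [List.append_assoc]
      · intro x hx
        rcases List.mem_cons.mp hx with h | h
        · subst h
          exact ⟨hE.1.2.1, pvReach.step hcur hE.1⟩
        · exact hfr x h
      · simpa [List.append_assoc] using hnd''
      · intro d' hd' he'
        rcases List.mem_cons.mp hd' with h | h
        · rw [h, ← hqdef]
          simp
        · simpa [List.append_assoc] using hcl d' h he'
    · rw [List.foldl_cons, pvStepA_skip hd hsh ht queue flag hE]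
      obtain ⟨fr, heq, hfr, hnd', hcl⟩ := ih hsub' queue t flag ht hnd
      refine ⟨fr, heq, hfr, hnd', ?_⟩
      intro d' hd' he'
      rcases List.mem_cons.mp hd' with h | h
      · rw [h] at he' ⊢
        have hmem : pvAddTwoTuple cur d ∈ s :: t := by
          by_contra hcon
          exact hE ⟨he', hcon⟩
        rcases List.mem_cons.mp hmem with h2 | h2
        · exact List.mem_cons.mpr (Or.inl h2)
        · exact List.mem_cons_of_mem _ (List.mem_append_left _ h2)
      · exact hcl d' h he'
theorem pvLoopA_emptyq (matrix : List (List Int)) (N L R : Int) (fuel : Nat)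
    (moved : List (Int × Int)) (vis : List (List Int)) (flag : Int) :
    pvLoopA matrix N L R fuel ([], moved, vis, flag) = ([], moved, vis, flag) := by
  cases fuel with
  | zero => rfl
  | succ f => rw [pvLoopA]; rfl

theorem pvLoopA_step (matrix : List (List Int)) (N L R : Int) (fuel : Nat)
    (queue moved : List (Int × Int)) (vis : List (List Int)) (flag : Int) (cur : Int × Int)
    (h : queue.getLast? = some cur) :
    pvLoopA matrix N L R (fuel + 1) (queue, moved, vis, flag) =
      pvLoopA matrix N L R fuel
        (pvDirs.foldl (pvStepA matrix N L R cur) (queue.dropLast, moved, vis, flag)) := by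
  rw [pvLoopA, h]

theorem pvLoopB_step (matrix : List (List Int)) (s : Int × Int) (N L R : Int) (fuel : Nat)
    (frontier : List (Int × Int)) (hne : frontier ≠ [])
    (comp : List (Int × Int)) (vis : List (List Int)) :
    pvLoopB matrix s N L R (fuel + 1) frontier (comp, vis) =
      pvLoopB matrix s N L R fuel
        (frontier.foldl (fun st p => (pvNbrs p).foldl (pvVisitB matrix s N L R p) st)
          ([], comp, vis)).1
        ((frontier.foldl (fun st p => (pvNbrs p).foldl (pvVisitB matrix s N L R p) st)
          ([], comp, vis)).2.1,
         (frontier.foldl (fun st p => (pvNbrs p).foldl (pvVisitB matrix s N L R p) st)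
          ([], comp, vis)).2.2) := by
  rw [pvLoopB, if_neg (by simpa [List.isEmpty_iff] using hne)]


def pvGridL (N : Int) : List (Int × Int) :=
  ((List.range N.toNat).map Int.ofNat) ×ˢ ((List.range N.toNat).map Int.ofNat)

theorem pvGridL_length (N : Int) : (pvGridL N).length = N.toNat * N.toNat := by
  rw [pvGridL, List.length_product]
  simp

theorem pvCell_mem_gridL {N : Int} {q : Int × Int} (h : pvCell N q) : q ∈ pvGridL N := by
  obtain ⟨h1, h2, h3, h4⟩ := h
  have e1 : q.1.toNat < N.toNat := by omega
  have e2 : q.2.toNat < N.toNat := by omega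
  have hq : q = ((q.1.toNat : Int), (q.2.toNat : Int)) :=
    Prod.ext (by simp [Int.toNat_of_nonneg h1]) (by simp [Int.toNat_of_nonneg h3])
  rw [hq, pvGridL]
  refine List.pair_mem_product.mpr ⟨?_, ?_⟩
  · exact List.mem_map.mpr ⟨q.1.toNat, List.mem_range.mpr e1, rfl⟩
  · exact List.mem_map.mpr ⟨q.2.toNat, List.mem_range.mpr e2, rfl⟩

theorem pvCells_length_le {N : Int} {t : List (Int × Int)}
    (hnd : t.Nodup) (hc : ∀ p ∈ t, pvCell N p) : t.length ≤ N.toNat * N.toNat := by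
  calc t.length = t.toFinset.card := (List.toFinset_card_of_nodup hnd).symm
    _ ≤ (pvGridL N).toFinset.card := Finset.card_le_card (fun x hx =>
          List.mem_toFinset.mpr (pvCell_mem_gridL (hc x (List.mem_toFinset.mp hx))))
    _ ≤ (pvGridL N).length := List.toFinset_card_le _
    _ = _ := pvGridL_length N

theorem pvLoopA_spec {matrix vis0 : List (List Int)} {N L R : Int} {s : Int × Int}
    (hsh : pvShape N vis0) :
    ∀ (fuel : Nat) (queue t : List (Int × Int)) (flag : Int),
      (∀ p ∈ t, pvCell N p) → (s :: t).Nodup → queue.Nodup →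
      (∀ p ∈ queue, p ∈ s :: t) →
      (∀ p ∈ s :: t, pvReach matrix vis0 N L R s p) →
      flag = (if t = [] then (0 : Int) else 1) →
      (∀ p ∈ s :: t, p ∉ queue → ∀ q, pvEdge matrix vis0 N L R p q → q ∈ s :: t) →
      queue.length + 2 * ((N.toNat * N.toNat + 1) - (s :: t).length) ≤ fuel →
      ∃ t', pvLoopA matrix N L R fuel (queue, s :: t, pvMark vis0 t, flag)
          = ([], s :: t', pvMark vis0 t', if t' = [] then (0 : Int) else 1) ∧
        (∀ p ∈ t', pvCell N p) ∧ (s :: t').Nodup ∧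
        (∀ q, q ∈ s :: t' ↔ pvReach matrix vis0 N L R s q) := by
  intro fuel
  induction fuel with
  | zero =>
    intro queue t flag ht hnd hqnd hqm hr hf hcl hfu
    have hq : queue = [] := List.eq_nil_of_length_eq_zero (by omega)
    subst hq
    subst hf
    refine ⟨t, rfl, ht, hnd, ?_⟩
    intro q
    constructor
    · exact hr q
    · exact fun h => pvReach_mem (List.mem_cons_self ..)
        (fun p hp => hcl p hp (by simp)) q h
  | succ fuel ih =>
    intro queue t flag ht hnd hqnd hqm hr hf hcl hfu
    by_cases hqe : queue = []
    · subst hqe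
      subst hf
      refine ⟨t, pvLoopA_emptyq .., ht, hnd, ?_⟩
      intro q
      constructor
      · exact hr q
      · exact fun h => pvReach_mem (List.mem_cons_self ..)
          (fun p hp => hcl p hp (by simp)) q h
    · set cur := queue.getLast hqe with hcur
      set rest := queue.dropLast with hrest
      have hsplit : rest ++ [cur] = queue := List.dropLast_append_getLast hqe
      have hglast : queue.getLast? = some cur := List.getLast?_eq_some_getLast ..
      have hcurm : cur ∈ s :: t := hqm cur (List.getLast_mem hqe)
      have hreach : pvReach matrix vis0 N L R s cur := hr cur hcurm
      have hq2 : (rest ++ [cur]).Nodup := by rw [hsplit]; exact hqnd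
      have hcnr : cur ∉ rest := (List.nodup_cons.mp (List.nodup_append_comm.mp hq2)).1
      obtain ⟨fr, heq, hfr, hnd2, hclf⟩ :=
        pvFoldA_spec hsh hreach pvDirs (fun d hd => hd) rest t flag ht hnd
      have hfresh : ∀ x ∈ fr, x ∉ s :: t := by
        have hdisj := List.disjoint_of_nodup_append ((List.nodup_cons.mp hnd2).2)
        intro x hx hmem
        rcases List.mem_cons.mp hmem with h | h
        · exact (List.nodup_cons.mp hnd2).1 (List.mem_append_right t (h ▸ hx))
        · exact hdisj h hx
      have hrestnd : rest.Nodup := List.Sublist.nodup (List.dropLast_sublist _) hqnd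
      have hfrnd : fr.Nodup := List.Nodup.of_append_right ((List.nodup_cons.mp hnd2).2)
      have hqnd' : (rest ++ fr).Nodup := by
        rw [List.nodup_append]
        refine ⟨hrestnd, hfrnd, ?_⟩
        intro a ha b hb heq
        exact hfresh b hb (hqm b (by rw [← hsplit]; exact List.mem_append_left _ (heq ▸ ha)))
      have hqm' : ∀ p ∈ rest ++ fr, p ∈ s :: (t ++ fr) := by
        intro p hp
        rcases List.mem_append.mp hp with h | h
        · have hpq := hqm p (by rw [← hsplit]; exact List.mem_append_left _ h)
          rcases List.mem_cons.mp hpq with h2 | h2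
          · exact List.mem_cons.mpr (Or.inl h2)
          · exact List.mem_cons_of_mem _ (List.mem_append_left _ h2)
        · exact List.mem_cons_of_mem _ (List.mem_append_right _ h)
      have hr' : ∀ p ∈ s :: (t ++ fr), pvReach matrix vis0 N L R s p := by
        intro p hp
        rcases List.mem_cons.mp hp with h | h
        · exact h ▸ pvReach.base
        · rcases List.mem_append.mp h with h2 | h2
          · exact hr p (List.mem_cons_of_mem _ h2)
          · exact (hfr p h2).2
      have ht' : ∀ p ∈ t ++ fr, pvCell N p := by
        intro p hp
        rcases List.mem_append.mp hp with h | h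
        · exact ht p h
        · exact (hfr p h).1
      have hf' : (if fr = [] then flag else 1) = (if t ++ fr = [] then (0 : Int) else 1) := by
        rcases fr with _ | ⟨x, fr⟩
        · simpa using hf
        · simp
      have hcl' : ∀ p ∈ s :: (t ++ fr), p ∉ rest ++ fr →
          ∀ q, pvEdge matrix vis0 N L R p q → q ∈ s :: (t ++ fr) := by
        intro p hp hpq q hq
        have hpold : p ∈ s :: t ∨ p ∈ fr := by
          rcases List.mem_cons.mp hp with h | h
          · exact Or.inl (h ▸ List.mem_cons_self ..)
          · rcases List.mem_append.mp h with h2 | h2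
            · exact Or.inl (List.mem_cons_of_mem _ h2)
            · exact Or.inr h2
        rcases hpold with h | h
        · by_cases hpc : p = cur
          · subst hpc
            have hnb := hq.1
            rw [pvNbrs_eq_map] at hnb
            obtain ⟨d, hd, hdq⟩ := List.mem_map.mp hnb
            exact hdq ▸ hclf d hd (hdq ▸ hq)
          · have hpnq : p ∉ queue := by
              rw [← hsplit]
              intro hmem
              rcases List.mem_append.mp hmem with h2 | h2
              · exact hpq (List.mem_append_left _ h2)
              · exact hpc (List.mem_singleton.mp h2)
            have hq2 := hcl p h hpnq q hq
            rcases List.mem_cons.mp hq2 with h2 | h2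
            · exact List.mem_cons.mpr (Or.inl h2)
            · exact List.mem_cons_of_mem _ (List.mem_append_left _ h2)
        · exact absurd (List.mem_append_right rest h) hpq
      have hbound : (t ++ fr).length ≤ N.toNat * N.toNat :=
        pvCells_length_le ((List.nodup_cons.mp hnd2).2) ht'
      have hfu' : (rest ++ fr).length +
          2 * ((N.toNat * N.toNat + 1) - (s :: (t ++ fr)).length) ≤ fuel := by
        have hql : queue.length = rest.length + 1 := by
          rw [← hsplit]; simp
        simp only [List.length_append, List.length_cons] at hfu hbound ⊢
        omega
      obtain ⟨t', heq', ht'', hnd3, hmem3⟩ :=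
        ih (rest ++ fr) (t ++ fr) _ ht' hnd2 hqnd' hqm' hr' hf' hcl' hfu'
      refine ⟨t', ?_, ht'', hnd3, hmem3⟩
      have hstep : pvLoopA matrix N L R (fuel + 1) (queue, s :: t, pvMark vis0 t, flag)
          = pvLoopA matrix N L R fuel
              (pvDirs.foldl (pvStepA matrix N L R cur) (rest, s :: t, pvMark vis0 t, flag)) :=
        pvLoopA_step matrix N L R fuel queue (s :: t) (pvMark vis0 t) flag cur hglast
      rw [hstep, heq]
      exact heq'

theorem pvVisitB_add {matrix vis0 : List (List Int)} {N L R : Int} {s p q : Int × Int}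
    (hsh : pvShape N vis0) {t : List (Int × Int)} (ht : ∀ x ∈ t, pvCell N x)
    (next : List (Int × Int))
    (hE : pvEdge matrix vis0 N L R p q) (hnm : q ∉ s :: t) :
    pvVisitB matrix s N L R p (next, s :: t, pvMark vis0 t) q =
      (next ++ [q], (s :: t) ++ [q], pvMark vis0 (t ++ [q])) := by
  obtain ⟨hnb, hc, hv, h1⟩ := hE
  have hqt : q ∉ t := fun h => hnm (List.mem_cons_of_mem _ h)
  have hqs : q ≠ s := fun h => hnm (h ▸ List.mem_cons_self ..)
  have hmk : pvGetCell (pvMark vis0 t) q.1 q.2 = pvGetCell vis0 q.1 q.2 := by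
    rw [pvGetCell_mark hsh ht hc, if_neg hqt]
  simp only [pvVisitB]
  rw [if_neg, if_neg, if_neg]
  · simp [pvMark]
  · simp only [hmk]
    simp [hqs, h1]
  · simpa using hv
  · simpa [pvCell] using hc

theorem pvVisitB_skip {matrix vis0 : List (List Int)} {N L R : Int} {s p q : Int × Int}
    (hnb : q ∈ pvNbrs p)
    (hsh : pvShape N vis0) {t : List (Int × Int)} (ht : ∀ x ∈ t, pvCell N x)
    (next : List (Int × Int))
    (hE : ¬ (pvEdge matrix vis0 N L R p q ∧ q ∉ s :: t)) :
    pvVisitB matrix s N L R p (next, s :: t, pvMark vis0 t) q =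
      (next, s :: t, pvMark vis0 t) := by
  simp only [pvVisitB]
  split
  · rfl
  · split
    · rfl
    · split
      · rfl
      · exfalso
        rename_i h1 h2 h3
        have hc : pvCell N q := by simpa [pvCell] using h1
        simp only [Bool.or_eq_true, not_or, beq_iff_eq] at h3
        have hqs : q ≠ s := h3.1
        have hmk := pvGetCell_mark (q := q) hsh ht hc
        have hqt : q ∉ t := by
          intro hmem
          rw [if_pos hmem] at hmk
          exact h3.2 (by simpa using hmk)
        have h1v : pvGetCell vis0 q.1 q.2 ≠ 1 := by
          rw [if_neg hqt] at hmk
          rw [← hmk]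
          intro hcon
          exact h3.2 (by simpa using hcon)
        apply hE
        refine ⟨⟨hnb, hc, by simpa using h2, h1v⟩, ?_⟩
        intro hmem
        rcases List.mem_cons.mp hmem with h | h
        · exact hqs h
        · exact hqt h

theorem pvFoldB_spec {matrix vis0 : List (List Int)} {N L R : Int} {s p : Int × Int}
    (hsh : pvShape N vis0) (hp : pvReach matrix vis0 N L R s p) :
    ∀ (ns : List (Int × Int)), (∀ x ∈ ns, x ∈ pvNbrs p) →
    ∀ (next t : List (Int × Int)),
      (∀ x ∈ t, pvCell N x) → (s :: t).Nodup →
      ∃ fr,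
        ns.foldl (pvVisitB matrix s N L R p) (next, s :: t, pvMark vis0 t)
          = (next ++ fr, s :: (t ++ fr), pvMark vis0 (t ++ fr)) ∧
        (∀ x ∈ fr, pvCell N x ∧ pvReach matrix vis0 N L R s x) ∧
        (s :: (t ++ fr)).Nodup ∧
        (∀ q ∈ ns, pvEdge matrix vis0 N L R p q → q ∈ s :: (t ++ fr)) := by
  intro ns
  induction ns with
  | nil =>
    intro _ next t ht hnd
    exact ⟨[], by simp, by simp, by simpa using hnd, by simp⟩
  | cons q ns ih =>
    intro hsub next t ht hnd
    have hq := hsub q (List.mem_cons_self ..)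
    have hsub' : ∀ x ∈ ns, x ∈ pvNbrs p := fun x hx => hsub x (List.mem_cons_of_mem _ hx)
    by_cases hE : pvEdge matrix vis0 N L R p q ∧ q ∉ s :: t
    · have ht' : ∀ x ∈ t ++ [q], pvCell N x := by
        intro x hx
        rcases List.mem_append.mp hx with h | h
        · exact ht x h
        · rw [List.mem_singleton.mp h]; exact hE.1.2.1
      have hnd' : (s :: (t ++ [q])).Nodup := by
        rcases List.nodup_cons.mp hnd with ⟨hs, hts⟩
        have h2 := hE.2
        simp only [List.mem_cons, not_or] at h2
        refine List.nodup_cons.mpr ⟨?_, ?_⟩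
        · intro hmem
          rcases List.mem_append.mp hmem with h | h
          · exact hs h
          · exact h2.1 (List.mem_singleton.mp h).symm
        · rw [List.nodup_append]
          refine ⟨hts, List.nodup_singleton q, ?_⟩
          intro a ha b hb heq
          rw [heq, List.mem_singleton.mp hb] at ha
          exact h2.2 ha
      obtain ⟨fr, heq, hfr, hnd'', hcl⟩ := ih hsub' (next ++ [q]) (t ++ [q]) ht' hnd'
      refine ⟨q :: fr, ?_, ?_, ?_, ?_⟩
      · rw [List.foldl_cons, pvVisitB_add hsh ht next hE.1 hE.2]
        rw [show (s :: t) ++ [q] = s :: (t ++ [q]) from rfl]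
        rw [heq]
        simp [List.append_assoc]
      · intro x hx
        rcases List.mem_cons.mp hx with h | h
        · subst h
          exact ⟨hE.1.2.1, pvReach.step hp hE.1⟩
        · exact hfr x h
      · simpa [List.append_assoc] using hnd''
      · intro q' hq' he'
        rcases List.mem_cons.mp hq' with h | h
        · rw [h]
          simp
        · simpa [List.append_assoc] using hcl q' h he'
    · rw [List.foldl_cons, pvVisitB_skip hq hsh ht next hE]
      obtain ⟨fr, heq, hfr, hnd', hcl⟩ := ih hsub' next t ht hnd
      refine ⟨fr, heq, hfr, hnd', ?_⟩
      intro q' hq' he'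
      rcases List.mem_cons.mp hq' with h | h
      · rw [h] at he' ⊢
        have hmem : q ∈ s :: t := by
          by_contra hcon
          exact hE ⟨he', hcon⟩
        rcases List.mem_cons.mp hmem with h2 | h2
        · exact List.mem_cons.mpr (Or.inl h2)
        · exact List.mem_cons_of_mem _ (List.mem_append_left _ h2)
      · exact hcl q' h he'

theorem pvFrontier_spec {matrix vis0 : List (List Int)} {N L R : Int} {s : Int × Int}
    (hsh : pvShape N vis0) :
    ∀ (fs : List (Int × Int)), (∀ x ∈ fs, pvReach matrix vis0 N L R s x) →
    ∀ (next t : List (Int × Int)),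
      (∀ x ∈ t, pvCell N x) → (s :: t).Nodup →
      ∃ fr,
        fs.foldl (fun st p => (pvNbrs p).foldl (pvVisitB matrix s N L R p) st)
            (next, s :: t, pvMark vis0 t)
          = (next ++ fr, s :: (t ++ fr), pvMark vis0 (t ++ fr)) ∧
        (∀ x ∈ fr, pvCell N x ∧ pvReach matrix vis0 N L R s x) ∧
        (s :: (t ++ fr)).Nodup ∧
        (∀ p ∈ fs, ∀ q, pvEdge matrix vis0 N L R p q → q ∈ s :: (t ++ fr)) := by
  intro fs
  induction fs with
  | nil =>
    intro _ next t ht hnd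
    exact ⟨[], by simp, by simp, by simpa using hnd, by simp⟩
  | cons p fs ih =>
    intro hrs next t ht hnd
    have hp := hrs p (List.mem_cons_self ..)
    have hrs' : ∀ x ∈ fs, pvReach matrix vis0 N L R s x :=
      fun x hx => hrs x (List.mem_cons_of_mem _ hx)
    obtain ⟨fr1, heq1, hfr1, hnd1, hcl1⟩ :=
      pvFoldB_spec hsh hp (pvNbrs p) (fun x hx => hx) next t ht hnd
    have ht1 : ∀ x ∈ t ++ fr1, pvCell N x := by
      intro x hx
      rcases List.mem_append.mp hx with h | h
      · exact ht x h
      · exact (hfr1 x h).1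
    obtain ⟨fr2, heq2, hfr2, hnd2, hcl2⟩ := ih hrs' (next ++ fr1) (t ++ fr1) ht1 hnd1
    refine ⟨fr1 ++ fr2, ?_, ?_, ?_, ?_⟩
    · rw [List.foldl_cons, heq1, heq2]
      simp [List.append_assoc]
    · intro x hx
      rcases List.mem_append.mp hx with h | h
      · exact hfr1 x h
      · exact hfr2 x h
    · simpa [List.append_assoc] using hnd2
    · intro p' hp' q hq
      rcases List.mem_cons.mp hp' with h | h
      · have := hcl1 q (h ▸ hq.1) (h ▸ hq)
        rcases List.mem_cons.mp this with h2 | h2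
        · exact List.mem_cons.mpr (Or.inl h2)
        · simpa [List.append_assoc] using
            List.mem_cons_of_mem s (List.mem_append_left fr2 h2)
      · simpa [List.append_assoc] using hcl2 p' h q hq

theorem pvLoopB_nil (matrix : List (List Int)) (s : Int × Int) (N L R : Int)
    (fuel : Nat) (st : List (Int × Int) × List (List Int)) :
    pvLoopB matrix s N L R fuel [] st = st := by
  cases fuel with
  | zero => rfl
  | succ fuel => rw [pvLoopB]; simp

theorem pvLoopB_spec {matrix vis0 : List (List Int)} {N L R : Int} {s : Int × Int}
    (hsh : pvShape N vis0) :
    ∀ (fuel : Nat) (frontier t : List (Int × Int)),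
      (∀ x ∈ t, pvCell N x) → (s :: t).Nodup →
      (∀ p ∈ s :: t, pvReach matrix vis0 N L R s p) →
      (∀ p ∈ frontier, pvReach matrix vis0 N L R s p) →
      (∀ p ∈ s :: t, p ∉ frontier → ∀ q, pvEdge matrix vis0 N L R p q → q ∈ s :: t) →
      (N.toNat * N.toNat + 2) - (s :: t).length + 1 ≤ fuel →
      ∃ t', pvLoopB matrix s N L R fuel frontier (s :: t, pvMark vis0 t)
          = (s :: t', pvMark vis0 t') ∧
        (∀ p ∈ t', pvCell N p) ∧ (s :: t').Nodup ∧
        (∀ q, q ∈ s :: t' ↔ pvReach matrix vis0 N L R s q) := by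
  intro fuel
  induction fuel with
  | zero =>
    intro frontier t ht hnd hrt hrf hcl hfu
    exact absurd hfu (by omega)
  | succ fuel ih =>
    intro frontier t ht hnd hrt hrf hcl hfu
    by_cases hfe : frontier = []
    · subst hfe
      refine ⟨t, pvLoopB_nil .., ht, hnd, ?_⟩
      intro q
      refine ⟨hrt q, ?_⟩
      exact fun h => pvReach_mem (List.mem_cons_self ..)
        (fun p hp => hcl p hp (by simp)) q h
    · obtain ⟨fr, heq, hfr, hnd2, hclf⟩ :=
        pvFrontier_spec hsh frontier hrf [] t ht hnd
      have ht' : ∀ x ∈ t ++ fr, pvCell N x := by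
        intro x hx
        rcases List.mem_append.mp hx with h | h
        · exact ht x h
        · exact (hfr x h).1
      have hrt' : ∀ p ∈ s :: (t ++ fr), pvReach matrix vis0 N L R s p := by
        intro p hp
        rcases List.mem_cons.mp hp with h | h
        · exact h ▸ pvReach.base
        · rcases List.mem_append.mp h with h2 | h2
          · exact hrt p (List.mem_cons_of_mem _ h2)
          · exact (hfr p h2).2
      have hrf' : ∀ p ∈ fr, pvReach matrix vis0 N L R s p := fun p hp => (hfr p hp).2
      have hcl' : ∀ p ∈ s :: (t ++ fr), p ∉ fr →
          ∀ q, pvEdge matrix vis0 N L R p q → q ∈ s :: (t ++ fr) := by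
        intro p hp hpf q hq
        have hpold : p ∈ s :: t := by
          rcases List.mem_cons.mp hp with h | h
          · exact h ▸ List.mem_cons_self ..
          · rcases List.mem_append.mp h with h2 | h2
            · exact List.mem_cons_of_mem _ h2
            · exact absurd h2 hpf
        by_cases hpfr : p ∈ frontier
        · exact hclf p hpfr q hq
        · have hq2 := hcl p hpold hpfr q hq
          rcases List.mem_cons.mp hq2 with h2 | h2
          · exact List.mem_cons.mpr (Or.inl h2)
          · exact List.mem_cons_of_mem _ (List.mem_append_left _ h2)
      have hstep : pvLoopB matrix s N L R (fuel + 1) frontier (s :: t, pvMark vis0 t)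
          = pvLoopB matrix s N L R fuel fr (s :: (t ++ fr), pvMark vis0 (t ++ fr)) := by
        rw [pvLoopB_step matrix s N L R fuel frontier hfe, heq]
        rfl
      rcases fr with _ | ⟨x, fr2⟩
      · refine ⟨t, ?_, ht, hnd, ?_⟩
        · rw [hstep, pvLoopB_nil]
          simp
        · intro q
          refine ⟨hrt q, ?_⟩
          refine fun h => pvReach_mem (List.mem_cons_self ..) (fun p hp => ?_) q h
          have := hcl' p (by simpa using hp) (by simp)
          simpa using this
      · have hbound : (t ++ x :: fr2).length ≤ N.toNat * N.toNat :=
          pvCells_length_le ((List.nodup_cons.mp hnd2).2) ht'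
        have hfu' : (N.toNat * N.toNat + 2) - (s :: (t ++ x :: fr2)).length + 1 ≤ fuel := by
          simp only [List.length_cons, List.length_append] at hfu hbound ⊢
          omega
        obtain ⟨t', heq', ht'', hnd3, hmem3⟩ :=
          ih (x :: fr2) (t ++ x :: fr2) ht' hnd2 hrt' hrf' hcl' hfu'
        exact ⟨t', by rw [hstep]; exact heq', ht'', hnd3, hmem3⟩

theorem pvFoldl_sum (l : List (Int × Int)) (g : Int × Int → Int) :
    l.foldl (fun a p => a + g p) 0 = (l.map g).sum := by
  rw [List.sum_eq_foldl, List.foldl_map]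

theorem pvBfsA_char {matrix vis0 : List (List Int)} {N L R : Int} {s : Int × Int}
    (hsh : pvShape N vis0) :
    ∃ t', pvLoopA matrix N L R (2 * (N.toNat * N.toNat + 1) + 1) ([s], [s], vis0, 0)
        = ([], s :: t', pvMark vis0 t', if t' = [] then (0 : Int) else 1) ∧
      (∀ p ∈ t', pvCell N p) ∧ (s :: t').Nodup ∧
      (∀ q, q ∈ s :: t' ↔ pvReach matrix vis0 N L R s q) := by
  have h := pvLoopA_spec (matrix := matrix) (vis0 := vis0) (N := N) (L := L) (R := R)
    (s := s) hsh (2 * (N.toNat * N.toNat + 1) + 1) [s] [] 0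
    (by simp) (by simp) (by simp) (by simp)
    (by intro p hp; rcases List.mem_cons.mp hp with h | h
        · rw [h]; exact pvReach.base
        · simp at h)
    (by simp)
    (by intro p hp hnp q hq; exact absurd hp hnp)
    (by simp; omega)
  simpa [pvMark_nil] using h

theorem pvBfsB_char {matrix vis0 : List (List Int)} {N L R : Int} {s : Int × Int}
    (hsh : pvShape N vis0) :
    ∃ t', pvLoopB matrix s N L R (N.toNat * N.toNat + 3) [s] (s :: [], vis0)
        = (s :: t', pvMark vis0 t') ∧
      (∀ p ∈ t', pvCell N p) ∧ (s :: t').Nodup ∧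
      (∀ q, q ∈ s :: t' ↔ pvReach matrix vis0 N L R s q) := by
  have h := pvLoopB_spec (matrix := matrix) (vis0 := vis0) (N := N) (L := L) (R := R)
    (s := s) hsh (N.toNat * N.toNat + 3) [s] []
    (by simp) (by simp)
    (by intro p hp; rcases List.mem_cons.mp hp with h | h
        · rw [h]; exact pvReach.base
        · simp at h)
    (by intro p hp; rw [List.mem_singleton.mp hp]; exact pvReach.base)
    (by intro p hp hnp q hq; exact absurd hp hnp)
    (by simp)
  simpa [pvMark_nil] using h

theorem pvStepA_dead {matrix : List (List Int)} {N L R : Int} {cur : Int × Int}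
    (hk : ∀ d ∈ pvDirs, pvCheckIndex (pvAddTwoTuple cur d) N = false) :
    ∀ (l : List (Int × Int)), (∀ d ∈ l, d ∈ pvDirs) →
    ∀ (st : List (Int × Int) × List (Int × Int) × List (List Int) × Int),
      l.foldl (pvStepA matrix N L R cur) st = st := by
  intro l
  induction l with
  | nil => intro _ st; rfl
  | cons d l ihl =>
    intro hsub st
    rw [List.foldl_cons]
    have hstep : pvStepA matrix N L R cur st d = st := by
      simp only [pvStepA]
      rw [if_pos]
      simp [hk d (hsub d (List.mem_cons_self ..))]
    rw [hstep]
    exact ihl (fun x hx => hsub x (List.mem_cons_of_mem _ hx)) st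

theorem pvVisitB_dead {matrix : List (List Int)} {s : Int × Int} {N L R : Int} {p : Int × Int}
    (hk : ∀ q ∈ pvNbrs p, ¬ (0 ≤ q.1 ∧ q.1 < N ∧ 0 ≤ q.2 ∧ q.2 < N)) :
    ∀ (l : List (Int × Int)), (∀ q ∈ l, q ∈ pvNbrs p) →
    ∀ (st : List (Int × Int) × List (Int × Int) × List (List Int)),
      l.foldl (pvVisitB matrix s N L R p) st = st := by
  intro l
  induction l with
  | nil => intro _ st; rfl
  | cons q l ihl =>
    intro hsub st
    rw [List.foldl_cons]
    have hstep : pvVisitB matrix s N L R p st q = st := by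
      simp only [pvVisitB]
      rw [if_pos]
      simp [hk q (hsub q (List.mem_cons_self ..))]
    rw [hstep]
    exact ihl (fun x hx => hsub x (List.mem_cons_of_mem _ hx)) st

-- ===== VERDICT (by name: the statement is the Claim_ definition above) =====
theorem bfs_spec : Claim_equal_bfs := by
  unfold Claim_equal_bfs
  intro matrix currentPos visitedMatrix N L R hdom hpre
  unfold Spec_bfs
  rcases hpre with ⟨hsc, hm1, hm2, hv1, hv2⟩ | ⟨h1, h2, h3, h4⟩
  · -- main case: start in the grid, matrices large enough
    have hsh : pvShape N visitedMatrix := pvShape_of_mem hv1 hv2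
    obtain ⟨tA, hAeq, hAc, hAnd, hAm⟩ :=
      pvBfsA_char (matrix := matrix) (L := L) (R := R) (s := currentPos) hsh
    obtain ⟨tB, hBeq, hBc, hBnd, hBm⟩ :=
      pvBfsB_char (matrix := matrix) (L := L) (R := R) (s := currentPos) hsh
    have hperm : (currentPos :: tA).Perm (currentPos :: tB) :=
      (List.perm_ext_iff_of_nodup hAnd hBnd).mpr (fun a => (hAm a).trans ((hBm a).symm))
    have htperm : tA.Perm tB := hperm.cons_inv
    haveI hrc1 : RightCommutative
        (fun (v : List (List Int)) (p : Int × Int) => pvSetCell v p.1 p.2 1) :=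
      ⟨fun b a1 a2 => pvSetCell_comm b a1 a2 1⟩
    have hmarkeq : pvMark visitedMatrix tA = pvMark visitedMatrix tB := by
      unfold pvMark
      exact htperm.foldl_eq _
    have hlen : (currentPos :: tA).length = (currentPos :: tB).length := hperm.length_eq
    have htot : (currentPos :: tA).foldl (fun a p => a + pvGetCell matrix p.1 p.2) 0
        = ((currentPos :: tB).map (fun p => pvGetCell matrix p.1 p.2)).sum := by
      haveI : RightCommutative
          (fun (a : Int) (p : Int × Int) => a + pvGetCell matrix p.1 p.2) :=
        ⟨fun b a1 a2 => by ring⟩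
      rw [hperm.foldl_eq 0]
      exact pvFoldl_sum _ _
    simp only [bfs, bfs_alt, hAeq, hBeq]
    by_cases htAe : tA = []
    · have htBe : tB = [] := by
        have hpp := htperm.symm
        rw [htAe] at hpp
        exact hpp.eq_nil
      subst htAe
      subst htBe
      simp [pvMark_nil]
    · have htBe : tB ≠ [] := fun h => htAe (List.Perm.eq_nil (h ▸ htperm))
      have hflag : (if tA = [] then (0 : Int) else 1) = 1 := if_neg htAe
      have hlen0 : tB.length ≠ 0 := fun h => htBe (List.eq_nil_of_length_eq_zero h)
      have hlen1 : ((currentPos :: tB).length == 1) = false := by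
        rw [beq_eq_false_iff_ne, List.length_cons]
        omega
      haveI hrcm : ∀ c : Int, RightCommutative
          (fun (m : List (List Int)) (p : Int × Int) => pvSetCell m p.1 p.2 c) :=
        fun c => ⟨fun b a1 a2 => pvSetCell_comm b a1 a2 c⟩
      have hw : ∀ c : Int,
          (currentPos :: tA).foldl (fun m p => pvSetCell m p.1 p.2 c) matrix
            = (currentPos :: tB).foldl (fun m p => pvSetCell m p.1 p.2 c) matrix := by
        intro c
        haveI := hrcm c
        exact hperm.foldl_eq matrix
      rw [hflag]
      simp only [hmarkeq, htot, hlen, hlen1]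
      rw [hw]
      simp
  · -- degenerate case: every neighbour of the start is outside the grid
    have hkA : ∀ d ∈ pvDirs, pvCheckIndex (pvAddTwoTuple currentPos d) N = false := by
      intro d hd
      simp only [pvDirs, List.mem_cons, List.not_mem_nil, or_false] at hd
      rcases hd with rfl | rfl | rfl | rfl <;>
        · simp only [pvCheckIndex, pvAddTwoTuple, decide_eq_false_iff_not]
          omega
    have hkB : ∀ q ∈ pvNbrs currentPos, ¬ (0 ≤ q.1 ∧ q.1 < N ∧ 0 ≤ q.2 ∧ q.2 < N) := by
      intro q hq
      simp only [pvNbrs, List.mem_cons, List.not_mem_nil, or_false] at hq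
      rcases hq with rfl | rfl | rfl | rfl <;> omega
    have hA : pvLoopA matrix N L R (2 * (N.toNat * N.toNat + 1) + 1)
        ([currentPos], [currentPos], visitedMatrix, 0)
        = ([], [currentPos], visitedMatrix, 0) := by
      have e : 2 * (N.toNat * N.toNat + 1) + 1 = (2 * (N.toNat * N.toNat) + 2) + 1 := by ring
      rw [e, pvLoopA_step matrix N L R _ [currentPos] [currentPos] visitedMatrix 0 currentPos rfl]
      rw [show ([currentPos] : List (Int × Int)).dropLast = [] from rfl]
      rw [pvStepA_dead hkA pvDirs (fun d hd => hd)]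
      exact pvLoopA_emptyq ..
    have hB : pvLoopB matrix currentPos N L R (N.toNat * N.toNat + 3)
        [currentPos] ([currentPos], visitedMatrix)
        = ([currentPos], visitedMatrix) := by
      have e : N.toNat * N.toNat + 3 = (N.toNat * N.toNat + 2) + 1 := by ring
      rw [e, pvLoopB_step matrix currentPos N L R _ [currentPos] (by simp) [currentPos] visitedMatrix]
      rw [show ([currentPos] : List (Int × Int)).foldl
            (fun st p => (pvNbrs p).foldl (pvVisitB matrix currentPos N L R p) st)
            ([], [currentPos], visitedMatrix)
          = ([], [currentPos], visitedMatrix) from by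
        rw [List.foldl_cons, List.foldl_nil]
        exact pvVisitB_dead hkB (pvNbrs currentPos) (fun q hq => hq) _]
      exact pvLoopB_nil ..
    simp [bfs, bfs_alt, hA, hB]
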